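-- pv_equiv track=rewrite | github.com/MMD34/FC26-CAREER-MANAGER-ANALYTICS-SUITE | app/analytics/form.py | longest_unbeaten
-- ===== SOURCE A (Python) =====
-- from typing import Literal, Optional
--
-- Result = Literal["W", "D", "L"]
--
-- def longest_unbeaten(results: list[Result]) -> int:
--     """Length of the longest run without a loss (W or D count, L resets)."""
--     best = 0
--     run = 0
--     for r in results:
--         if r == "L":
--             run = 0
--         else:
--             run += 1
--             if run > best:
--                 best = run
--     return best
-- ===== SOURCE B (Python) =====
-- def _group_lens(rs):
--     """Lengths of the maximal consecutive runs of non-"L" results."""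
--     lens = []
--     i = 0
--     n = len(rs)
--     while i < n:
--         if rs[i] == "L":
--             i += 1
--             while i < n and rs[i] == "L":
--                 i += 1
--         else:
--             j = i + 1
--             while j < n and rs[j] != "L":
--                 j += 1
--             lens.append(j - i)
--             i = j
--     return lens
--
-- def longest_unbeaten(results):
--     """Length of the longest run without a loss (W or D count, L resets)."""
--     return max(_group_lens(results), default=0)
-- ===== Notes on version B (the rewrite author's own statement) =====
-- stated objective: alternative
-- what changed: Replaces the stateful running-counter loop by a group-then-reduce pass: the list is partitioned into maximal runs of losses vs non-losses, and the answer is the max of the non-loss group lengths (default 0).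
import Mathlib
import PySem

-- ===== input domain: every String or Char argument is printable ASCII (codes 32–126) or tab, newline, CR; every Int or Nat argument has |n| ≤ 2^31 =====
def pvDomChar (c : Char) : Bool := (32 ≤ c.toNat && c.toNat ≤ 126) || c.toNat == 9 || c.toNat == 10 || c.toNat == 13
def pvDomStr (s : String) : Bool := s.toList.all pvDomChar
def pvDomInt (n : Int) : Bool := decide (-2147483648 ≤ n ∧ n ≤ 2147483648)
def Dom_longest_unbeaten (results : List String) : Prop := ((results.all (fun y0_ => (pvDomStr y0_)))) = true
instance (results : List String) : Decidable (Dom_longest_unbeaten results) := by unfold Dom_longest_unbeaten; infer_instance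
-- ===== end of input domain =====

-- B: group-then-reduce instead of A's stateful running counter (alternative decomposition, same O(n) cost).

-- ===== PORT A =====
-- A's loop: state (best, run); "L" resets run, otherwise run+1 and best updated.
def longest_unbeaten (results : List String) : Int :=
  (results.foldl
    (fun (s : Int × Int) r =>
      if r == "L" then (s.1, 0)
      else
        let run := s.2 + 1
        (if run > s.1 then run else s.1, run))
    (0, 0)).1

-- ===== PORT B =====
-- lengths of the maximal consecutive runs of non-"L" results (Source B's _group_lens):
-- an "L" group is skipped wholesale, a non-"L" group contributes its length.
def pvGroupLens (rs : List String) : List Int :=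
  match rs with
  | [] => []
  | r :: rest =>
    if r == "L" then
      pvGroupLens (rest.dropWhile (fun x => x == "L"))
    else
      (((rest.takeWhile (fun x => !(x == "L"))).length : Int) + 1)
        :: pvGroupLens (rest.dropWhile (fun x => !(x == "L")))
termination_by rs.length
decreasing_by
  · exact Nat.lt_succ_of_le (List.length_dropWhile_le _ _)
  · exact Nat.lt_succ_of_le (List.length_dropWhile_le _ _)

-- max(lens, default=0): exact as foldl max 0 since every group length is ≥ 1.
def longest_unbeaten_alt (results : List String) : Int :=
  (pvGroupLens results).foldl max 0

-- ===== PRECONDITION & SPEC =====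
def Spec_longest_unbeaten (results : List String) (out : Int) : Prop := out = longest_unbeaten_alt results
instance (results : List String) (out : Int) : Decidable (Spec_longest_unbeaten results out) := by unfold Spec_longest_unbeaten; infer_instance

-- ===== CLAIM (what is proved, stated in full; the proofs are below) =====
def Claim_equal_longest_unbeaten : Prop := ∀ (results : List String), Dom_longest_unbeaten results → Spec_longest_unbeaten results (longest_unbeaten results)

-- ===== LEMMAS AND PROOFS =====

-- "best so far" of the remaining list, given the current streak `run`.
def pvHb (l : List String) (run : Int) : Int :=
  match l with
  | [] => run
  | r :: t => if r == "L" then max run (pvHb t 0) else pvHb t (run + 1)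

theorem pvHb_ge (l : List String) (run : Int) : run ≤ pvHb l run := by
  induction l generalizing run with
  | nil => simp [pvHb]
  | cons r t ih =>
    simp only [pvHb]
    split
    · exact le_max_left _ _
    · exact le_trans (by omega) (ih (run + 1))

-- A's fold computes max best (pvHb l run) whenever the invariant run ≤ best holds.
theorem foldA_eq (l : List String) (best run : Int) (h0 : 0 ≤ run) (h : run ≤ best) :
    (l.foldl
      (fun (s : Int × Int) r =>
        if r == "L" then (s.1, 0)
        else
          let run := s.2 + 1
          (if run > s.1 then run else s.1, run))
      (best, run)).1 = max best (pvHb l run) := by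
  induction l generalizing best run with
  | nil => simp [pvHb, max_eq_left h]
  | cons r t ih =>
    simp only [List.foldl_cons, pvHb]
    by_cases hr : r == "L"
    · simp only [hr, if_true]
      rw [ih best 0 le_rfl (le_trans h0 h), ← max_assoc, max_eq_left h]
    · simp only [hr, Bool.false_eq_true, if_false]
      rw [ih _ (run + 1) (by omega) (by omega)]
      have := pvHb_ge t (run + 1)
      omega

theorem foldmax (xs : List Int) (a b : Int) :
    List.foldl max (max a b) xs = max a (List.foldl max b xs) := by
  induction xs generalizing b with
  | nil => rfl
  | cons x xs ih =>
    simp only [List.foldl_cons]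
    rw [max_assoc, ih]

-- skipping one loss does not change the groups
theorem pvGroupLens_L (t : List String) : pvGroupLens ("L" :: t) = pvGroupLens t := by
  cases t with
  | nil => simp [pvGroupLens]
  | cons x t' =>
    by_cases hx : x == "L"
    · have hx' : x = "L" := by simpa using hx
      subst hx'
      simp [pvGroupLens, List.dropWhile]
    · simp [pvGroupLens, List.dropWhile, hx]

theorem pvHb_prefix (t : List String) (run : Int) :
    pvHb t run
      = pvHb (t.dropWhile (fun x => !(x == "L")))
          (run + ((t.takeWhile (fun x => !(x == "L"))).length : Int)) := by
  induction t generalizing run with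
  | nil => simp [pvHb]
  | cons r t ih =>
    by_cases hr : r == "L"
    · simp [pvHb, List.dropWhile, List.takeWhile, hr]
    · simp only [List.dropWhile, List.takeWhile, hr, Bool.not_false, List.length_cons]
      have hstep : pvHb (r :: t) run = pvHb t (run + 1) := by
        simp [pvHb, hr]
      rw [hstep, ih (run + 1)]
      congr 1
      push_cast
      ring

theorem pvHb_eq_B : ∀ (n : ℕ) (l : List String), l.length ≤ n →
    pvHb l 0 = List.foldl max 0 (pvGroupLens l) := by
  intro n
  induction n with
  | zero =>
    intro l hl
    have : l = [] := List.eq_nil_of_length_eq_zero (Nat.le_zero.mp hl)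
    subst this
    simp [pvHb, pvGroupLens]
  | succ n ih =>
    intro l hl
    cases l with
    | nil => simp [pvHb, pvGroupLens]
    | cons r t =>
      simp only [List.length_cons] at hl
      by_cases hr : r == "L"
      · have hr' : r = "L" := by simpa using hr
        subst hr'
        have h1 : pvHb ("L" :: t) 0 = pvHb t 0 := by
          have := pvHb_ge t (0 : Int)
          simp [pvHb]; omega
        rw [h1, pvGroupLens_L, ih t (by omega)]
      · -- non-loss head: peel the leading non-"L" group
        set tw : Int := ((t.takeWhile (fun x => !(x == "L"))).length : Int) with htw
        set d := t.dropWhile (fun x => !(x == "L")) with hd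
        have hdlen : d.length ≤ t.length := List.length_dropWhile_le _ _
        have hGL : pvGroupLens (r :: t) = (tw + 1) :: pvGroupLens d := by
          simp [pvGroupLens, hr, htw, hd]
        have hHb : pvHb (r :: t) 0 = pvHb d (tw + 1) := by
          have hstep : pvHb (r :: t) 0 = pvHb t (0 + 1) := by
            simp [pvHb, hr]
          rw [hstep, pvHb_prefix t (0 + 1), ← hd, ← htw]
          congr 1
          ring
        rw [hGL, hHb]
        simp only [List.foldl_cons]
        have htw0 : (0 : Int) ≤ tw := by positivity
        cases hdc : d with
        | nil =>
          simp [pvHb, pvGroupLens]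
          omega
        | cons x d' =>
          have hxL : x = "L" := by
            have hh := List.head?_dropWhile_not (fun x => !(x == "L")) t
            rw [← hd, hdc] at hh
            simp only [List.head?_cons] at hh
            simpa using hh
          subst hxL
          have hd'len : d'.length ≤ n := by
            rw [hdc] at hdlen
            simp only [List.length_cons] at hdlen
            omega
          simp only [pvHb, beq_self_eq_true, if_true]
          rw [pvGroupLens_L, ih d' hd'len]
          have h2 : max (0 : Int) (tw + 1) = tw + 1 := by omega
          rw [h2]
          have h3 : (tw + 1) = max (tw + 1) (0 : Int) := by omega
          rw [h3, foldmax]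
          have := pvHb_ge d' (0 : Int)
          rw [ih d' hd'len] at this
          omega

-- ===== VERDICT (by name: the statement is the Claim_ definition above) =====
theorem longest_unbeaten_spec : Claim_equal_longest_unbeaten := by
  intro results _
  show longest_unbeaten results = longest_unbeaten_alt results
  unfold longest_unbeaten longest_unbeaten_alt
  rw [foldA_eq results 0 0 le_rfl le_rfl, pvHb_eq_B results.length results le_rfl]
  have h := foldmax (pvGroupLens results) 0 0
  simp only [max_self] at h
  exact h.symm
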